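-- pv_equiv track=rewrite | github.com/collinear-ai/simlab | src/simlab/runtime/env_lifecycle.py | _health_wait_message
-- ===== SOURCE A (Python) =====
-- def _health_wait_message(services: dict[str, str]) -> str:
--     """Return a deterministic health-poll message from current service state."""
--     if not services:
--         return "Waiting for docker compose status..."
--
--     starting = sorted(name for name, status in services.items() if status == "starting")
--     unknown = sorted(name for name, status in services.items() if status == "unknown")
--
--     if starting:
--         if len(starting) == 1:
--             return f"Waiting for {starting[0]} health check..."
--         return f"Waiting for {len(starting)} services to become healthy..."
--
--     if unknown:
--         if len(unknown) == 1:
--             return f"Reading status for {unknown[0]}..."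
--         return f"Reading status for {len(unknown)} services..."
--
--     ready = sum(1 for status in services.values() if status in ("healthy", "running"))
--     if ready == len(services):
--         return "Confirming services are stable..."
--
--     return "Waiting for services to start..."
-- ===== SOURCE B (Python) =====
-- def _health_wait_message(services: dict[str, str]) -> str:
--     """Return a deterministic health-poll message from current service state."""
--     if not services:
--         return "Waiting for docker compose status..."
--
--     # One indexed pass: group service names by status, then consult the table.
--     groups: dict[str, list[str]] = {}
--     for name, status in services.items():
--         groups.setdefault(status, []).append(name)
--
--     starting = groups.get("starting", [])
--     if starting:
--         if len(starting) == 1: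
--             return f"Waiting for {starting[0]} health check..."
--         return f"Waiting for {len(starting)} services to become healthy..."
--
--     unknown = groups.get("unknown", [])
--     if unknown:
--         if len(unknown) == 1:
--             return f"Reading status for {unknown[0]}..."
--         return f"Reading status for {len(unknown)} services..."
--
--     ready = len(groups.get("healthy", [])) + len(groups.get("running", []))
--     if ready == len(services):
--         return "Confirming services are stable..."
--
--     return "Waiting for services to start..."
-- ===== Notes on version B (the rewrite author's own statement) =====
-- stated objective: simpler
-- what changed: Replaces A's two sorted filter-scans plus a separate counting scan with a single grouping pass that buckets service names by status, then reads lengths and the lone name from the table; the sort is dropped because only lengths and a single-element name are ever used.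
import Mathlib
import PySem

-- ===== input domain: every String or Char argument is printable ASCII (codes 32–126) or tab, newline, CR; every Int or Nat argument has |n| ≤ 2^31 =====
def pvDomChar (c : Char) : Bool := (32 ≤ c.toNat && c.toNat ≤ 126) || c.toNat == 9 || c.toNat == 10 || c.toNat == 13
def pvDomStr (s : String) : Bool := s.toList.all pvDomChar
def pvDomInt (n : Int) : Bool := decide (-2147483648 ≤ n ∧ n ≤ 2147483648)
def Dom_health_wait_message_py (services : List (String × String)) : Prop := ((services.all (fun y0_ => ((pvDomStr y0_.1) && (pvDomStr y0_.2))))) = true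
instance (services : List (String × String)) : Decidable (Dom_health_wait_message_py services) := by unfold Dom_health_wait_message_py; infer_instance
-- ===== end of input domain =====

-- B replaces A's two sorted filter-scans plus a counting scan by one grouping pass
-- bucketing names by status (the sort is unobservable: only lengths and a lone name are used).


-- ===== PORT A =====
def health_wait_message_py (services : List (String × String)) : String :=
  if services = [] then "Waiting for docker compose status..."
  else
    let starting := PySem.List.sorted ((services.filter (fun p => p.2 == "starting")).map Prod.fst) (fun x => x) false
    let unknown := PySem.List.sorted ((services.filter (fun p => p.2 == "unknown")).map Prod.fst) (fun x => x) false
    if starting ≠ [] then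
      if starting.length = 1 then
        "Waiting for " ++ PySem.List.pyGetD starting 0 "" ++ " health check..."
      else
        "Waiting for " ++ PySem.Int.toStr (starting.length : Int) ++ " services to become healthy..."
    else if unknown ≠ [] then
      if unknown.length = 1 then
        "Reading status for " ++ PySem.List.pyGetD unknown 0 "" ++ "..."
      else
        "Reading status for " ++ PySem.Int.toStr (unknown.length : Int) ++ " services..."
    else
      let ready := (services.map Prod.snd).countP (fun s => s == "healthy" || s == "running")
      if ready = services.length then "Confirming services are stable..."
      else "Waiting for services to start..."

-- ===== PORT B =====
def health_wait_message_py_alt (services : List (String × String)) : String :=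
  if services = [] then "Waiting for docker compose status..."
  else
    let groups := services.foldl (fun d p => d.modify p.2 [] (· ++ [p.1])) (PySem.Dict.empty : PySem.Dict String (List String))
    let starting := groups.getD "starting" []
    if starting ≠ [] then
      if starting.length = 1 then
        "Waiting for " ++ PySem.List.pyGetD starting 0 "" ++ " health check..."
      else
        "Waiting for " ++ PySem.Int.toStr (starting.length : Int) ++ " services to become healthy..."
    else
      let unknown := groups.getD "unknown" []
      if unknown ≠ [] then
        if unknown.length = 1 then
          "Reading status for " ++ PySem.List.pyGetD unknown 0 "" ++ "..."
        else
          "Reading status for " ++ PySem.Int.toStr (unknown.length : Int) ++ " services..."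
      else
        let ready := (groups.getD "healthy" []).length + (groups.getD "running" []).length
        if ready = services.length then "Confirming services are stable..."
        else "Waiting for services to start..."

-- ===== PRECONDITION & SPEC =====
def Spec_health_wait_message_py (services : List (String × String)) (out : String) : Prop := out = health_wait_message_py_alt services
instance (services : List (String × String)) (out : String) : Decidable (Spec_health_wait_message_py services out) := by unfold Spec_health_wait_message_py; infer_instance

-- ===== CLAIM (what is proved, stated in full; the proofs are below) =====
def Claim_equal_health_wait_message_py : Prop := ∀ (services : List (String × String)), Dom_health_wait_message_py services → Spec_health_wait_message_py services (health_wait_message_py services)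

-- ===== LEMMAS AND PROOFS =====

-- B's grouping table read at status c is exactly A's filter of services by status c.
lemma groups_getD (services : List (String × String)) (c : String) :
    ((services.foldl (fun d p => d.modify p.2 [] (· ++ [p.1])) (PySem.Dict.empty : PySem.Dict String (List String))).getD c [])
      = (services.filter (fun p => p.2 == c)).map Prod.fst := by
  have h : services.foldl (fun d p => d.modify p.2 [] (· ++ [p.1])) (PySem.Dict.empty : PySem.Dict String (List String))
      = (services.map (fun p => (p.2, p.1))).foldl (fun d p => d.modify p.1 [] (· ++ [p.2])) PySem.Dict.empty := by
    rw [List.foldl_map]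
  rw [h, PySem.Dict.getD_foldl_modify_append]
  simp [List.filter_map, List.map_map, Function.comp_def]

-- A's count over values splits into the two disjoint group sizes B adds up.
lemma ready_eq (l : List (String × String)) :
    l.countP (fun p => p.2 == "healthy" || p.2 == "running")
      = (l.filter (fun p => p.2 == "healthy")).length + (l.filter (fun p => p.2 == "running")).length := by
  induction l with
  | nil => rfl
  | cons x t ih =>
    by_cases hx : x.2 = "healthy" <;> by_cases hy : x.2 = "running" <;>
      (simp_all; try omega)

-- a singleton list sorts to itself
lemma sorted_singleton (n : String) :
    PySem.List.sorted [n] (fun x => x) false = [n] :=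
  PySem.List.sorted_eq_self_of_pairwise _ _ (List.pairwise_singleton _ _)

-- ===== VERDICT (by name: the statement is the Claim_ definition above) =====
theorem health_wait_message_py_spec : Claim_equal_health_wait_message_py := by
  intro services _
  unfold Spec_health_wait_message_py health_wait_message_py health_wait_message_py_alt
  by_cases hnil : services = []
  · simp [hnil]
  · simp only [if_neg hnil, groups_getD]
    set Ls := (services.filter (fun p => p.2 == "starting")).map Prod.fst with hLs
    set Lu := (services.filter (fun p => p.2 == "unknown")).map Prod.fst with hLu
    have hslen : (PySem.List.sorted Ls (fun x => x) false).length = Ls.length :=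
      (PySem.List.sorted_perm Ls (fun x => x) false).length_eq
    have hulen : (PySem.List.sorted Lu (fun x => x) false).length = Lu.length :=
      (PySem.List.sorted_perm Lu (fun x => x) false).length_eq
    by_cases h1s : Ls.length = 1
    · obtain ⟨n, hn⟩ := List.length_eq_one_iff.mp h1s
      rw [hn, sorted_singleton]; simp
    · by_cases h1u : Lu.length = 1
      · obtain ⟨n, hn⟩ := List.length_eq_one_iff.mp h1u
        rw [hn, sorted_singleton]
        simp only [ne_eq, PySem.List.sorted_eq_nil_iff, hslen, h1s]
        by_cases hs : Ls = [] <;> simp [hs]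
      · simp only [ne_eq, PySem.List.sorted_eq_nil_iff, hslen, hulen, h1s, h1u]
        by_cases hs : Ls = [] <;> by_cases hu : Lu = [] <;>
          simp [hs, hu, List.countP_map, ready_eq services, Function.comp_def]
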